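-- pv_equiv track=rewrite | github.com/ethereum-optimism/specs | scripts/gen_predeploy_docs.py | format_args_with_alternate_newlines
-- ===== SOURCE A (Python) =====
-- def format_args_with_alternate_newlines(args):
--     """Format CLI arguments with newlines every other argument."""
--     result = []
--     for i, arg in enumerate(args):
--         result.append(arg)
--         # Add newline after every second argument (indices 1, 3, 5, etc.)
--         if i % 2 == 1 and i < len(args) - 1:
--             result.append(' \\\n')
--         elif i < len(args) - 1:
--             result.append(' ')
--     return ''.join(result)
-- ===== SOURCE B (Python) =====
-- def format_args_with_alternate_newlines(args):
--     """Format CLI arguments with newlines every other argument."""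
--     pairs = [' '.join(args[i:i + 2]) for i in range(0, len(args), 2)]
--     return ' \\\n'.join(pairs)
-- ===== Notes on version B (the rewrite author's own statement) =====
-- stated objective: simpler
-- what changed: Replaced the enumerate loop with its per-index parity test and length comparison by a direct recursion that consumes two arguments at a time (' '.join for the final pair/singleton, ' \ ' between pairs).
import Mathlib
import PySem

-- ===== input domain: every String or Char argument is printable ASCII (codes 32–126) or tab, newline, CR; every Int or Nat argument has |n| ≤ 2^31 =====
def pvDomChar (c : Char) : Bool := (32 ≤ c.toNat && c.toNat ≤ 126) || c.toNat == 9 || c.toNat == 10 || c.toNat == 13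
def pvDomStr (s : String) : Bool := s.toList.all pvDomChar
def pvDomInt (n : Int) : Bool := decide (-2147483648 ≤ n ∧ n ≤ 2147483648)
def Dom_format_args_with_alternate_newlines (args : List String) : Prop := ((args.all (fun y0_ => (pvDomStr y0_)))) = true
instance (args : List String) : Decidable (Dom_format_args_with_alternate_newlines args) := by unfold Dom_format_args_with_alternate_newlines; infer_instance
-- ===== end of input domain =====

-- B replaces A's per-index parity-test loop by pair-chunking (' '.join of args[i:i+2] for even i) plus one ' \\\n'.join; return values proved equal on all inputs.

-- ===== PORT A =====
-- literal port of A's enumerate loop: result list accumulator, then ''.join.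
-- (i % 2 uses Lean's Int emod, which agrees with Python's % for the positive modulus 2)
def format_args_with_alternate_newlines (args : List String) : String :=
  let result : List String :=
    (PySem.List.enumerate args 0).foldl
      (fun result p =>
        let i := p.1
        let arg := p.2
        let result := result ++ [arg]
        if i % 2 = 1 ∧ i < (args.length : Int) - 1 then result ++ [" \\\n"]
        else if i < (args.length : Int) - 1 then result ++ [" "]
        else result)
      []
  PySem.Str.join "" result

-- ===== PORT B =====
-- transliteration of Source B: pairs = [' '.join(args[i:i+2]) for i in range(0, len(args), 2)]; ' \\\n'.join(pairs)
def format_args_with_alternate_newlines_alt (args : List String) : String :=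
  let pairs := (PySem.List.pyRange 0 (args.length : Int) 2).map
      (fun i => PySem.Str.join " " (PySem.List.slice args (some i) (some (i + 2))))
  PySem.Str.join " \\\n" pairs

-- ===== PRECONDITION & SPEC =====
def Spec_format_args_with_alternate_newlines (args : List String) (out : String) : Prop := out = format_args_with_alternate_newlines_alt args
instance (args : List String) (out : String) : Decidable (Spec_format_args_with_alternate_newlines args out) := by unfold Spec_format_args_with_alternate_newlines; infer_instance

-- ===== CLAIM (what is proved, stated in full; the proofs are below) =====
def Claim_equal_format_args_with_alternate_newlines : Prop := ∀ (args : List String), Dom_format_args_with_alternate_newlines args → Spec_format_args_with_alternate_newlines args (format_args_with_alternate_newlines args)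

-- ===== LEMMAS AND PROOFS =====

-- common recursive normal form both ports are reduced to
def pvFmtRec : List String → String
  | [] => ""
  | [a] => a
  | [a, b] => a ++ " " ++ b
  | a :: b :: c :: rest => a ++ " " ++ b ++ " \\\n" ++ pvFmtRec (c :: rest)

-- the per-element contribution of A's loop body
def pvSep (L : Int) (p : Int × String) : List String :=
  [p.2] ++ (if p.1 % 2 = 1 ∧ p.1 < L - 1 then [" \\\n"]
            else if p.1 < L - 1 then [" "] else [])

lemma pvFoldl_eq_flatMap (L : Int) (l : List (Int × String)) (acc : List String) :
    l.foldl
      (fun result p =>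
        let i := p.1
        let arg := p.2
        let result := result ++ [arg]
        if i % 2 = 1 ∧ i < L - 1 then result ++ [" \\\n"]
        else if i < L - 1 then result ++ [" "]
        else result)
      acc = acc ++ l.flatMap (pvSep L) := by
  induction l generalizing acc with
  | nil => simp
  | cons p l ih =>
      simp only [List.foldl_cons, List.flatMap_cons, ih, pvSep]
      split_ifs <;> simp

lemma pvJoin_nil_cons (p : List Char) (ps : List (List Char)) :
    PySem.Chars.join [] (p :: ps) = p ++ PySem.Chars.join [] ps := by
  cases ps with
  | nil => simp [PySem.Chars.join_singleton, PySem.Chars.join_nil]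
  | cons q rest => simp [PySem.Chars.join_cons_cons]

-- ''.join is concatenation
lemma pvJoin_nil_eq_flatten (l : List (List Char)) :
    PySem.Chars.join [] l = l.flatten := by
  induction l with
  | nil => simp [PySem.Chars.join_nil]
  | cons p ps ih => rw [pvJoin_nil_cons, ih]; simp

lemma pvJoin_cons_of_ne (sep p : List Char) (ps : List (List Char)) (h : ps ≠ []) :
    PySem.Chars.join sep (p :: ps) = p ++ sep ++ PySem.Chars.join sep ps := by
  cases ps with
  | nil => exact absurd rfl h
  | cons q rest => exact PySem.Chars.join_cons_cons sep p q rest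

-- A's loop, characterised: on even start index s, the flattened pieces spell pvFmtRec
lemma pvKey (L : Int) (xs : List String) (s : Int) (hs : s % 2 = 0)
    (hL : s + xs.length = L) :
    PySem.Chars.join []
        (((PySem.List.enumerate xs s).flatMap (pvSep L)).map String.toList) =
      (pvFmtRec xs).toList := by
  induction xs using pvFmtRec.induct generalizing s with
  | case1 =>
      simp [PySem.List.enumerate, pvFmtRec, PySem.Chars.join_nil]
  | case2 a =>
      have h2 : ¬ s < L - 1 := by simp at hL; omega
      simp [PySem.List.enumerate, pvSep, h2, pvFmtRec]
  | case3 a b =>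
      have h1 : ¬ s % 2 = 1 := by omega
      have e2 : s < L - 1 := by simp at hL; omega
      have e3 : (s + 1) % 2 = 1 := by omega
      have e4 : ¬ s + 1 < L - 1 := by simp at hL; omega
      simp [PySem.List.enumerate, pvSep, h1, e2, e3, e4, pvFmtRec, pvJoin_nil_eq_flatten]
  | case4 a b c rest ih =>
      have h1 : ¬ s % 2 = 1 := by omega
      have e2 : s < L - 1 := by simp at hL ⊢; omega
      have e3 : (s + 1) % 2 = 1 := by omega
      have e4 : s + 1 < L - 1 := by simp at hL ⊢; omega
      have hrec := ih (s + 2) (by omega) (by simp at hL ⊢; omega)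
      have hshift : s + 1 + 1 = s + 2 := by omega
      simp only [pvJoin_nil_eq_flatten] at hrec ⊢
      simp [PySem.List.enumerate, pvSep, h1, e2, e3, e4, hshift, pvFmtRec] at hrec ⊢
      rw [hrec]

-- B's chunk list in range-free form
lemma pvChunkForm (xs : List String) :
    (PySem.List.pyRange 0 (xs.length : Int) 2).map
        (fun i => PySem.Str.join " " (PySem.List.slice xs (some i) (some (i + 2)))) =
      (List.range ((xs.length + 1) / 2)).map
        (fun k => PySem.Str.join " " ((xs.drop (2 * k)).take 2)) := by
  rw [PySem.List.pyRange_of_pos 0 (xs.length : Int) (by norm_num), List.map_map]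
  have hcount : (if (0 : Int) < (xs.length : Int) then
      (((xs.length : Int) - 0 + 2 - 1) / 2).toNat else 0) = (xs.length + 1) / 2 := by
    split_ifs with h <;> omega
  rw [hcount]
  apply List.map_congr_left
  intro k _
  have hcast : (0 : Int) + 2 * (k : Int) = ((2 * k : Nat) : Int) := by push_cast; ring
  have hcast2 : ((2 * k : Nat) : Int) + 2 = (((2 * k : Nat) + 2 : Nat) : Int) := by push_cast; ring
  simp only [Function.comp, hcast, hcast2]
  rw [show ((2 * k : Nat) + 2 : Nat) = (2 * k) + (2 : Nat) by rfl]
  rw [show (((2 * k : Nat) + 2 : Nat) : Int) = ((2 * k : Nat) : Int) + ((2 : Nat) : Int) by push_cast; ring]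
  rw [PySem.List.slice_natCast_add xs (2 * k) 2]

-- chunk-then-join spells pvFmtRec
lemma pvChunkKey (xs : List String) :
    (PySem.Str.join " \\\n" ((List.range ((xs.length + 1) / 2)).map
        (fun k => PySem.Str.join " " ((xs.drop (2 * k)).take 2)))).toList =
      (pvFmtRec xs).toList := by
  induction xs using pvFmtRec.induct with
  | case1 =>
      simp [pvFmtRec, PySem.Str.toList_join, PySem.Chars.join_nil]
  | case2 a =>
      simp [pvFmtRec, PySem.Str.toList_join, PySem.Chars.join_singleton]
  | case3 a b =>
      simp [pvFmtRec, PySem.Str.toList_join, PySem.Chars.join_singleton,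
        PySem.Chars.join_cons_cons]
  | case4 a b c rest ih =>
      have hlen : (((a :: b :: c :: rest).length + 1) / 2) =
          ((c :: rest).length + 1) / 2 + 1 := by simp only [List.length_cons]; omega
      have hne : ((c :: rest).length + 1) / 2 ≠ 0 := by simp only [List.length_cons]; omega
      rw [hlen, List.range_succ_eq_map, List.map_cons, List.map_map]
      have hdrop : ∀ k : Nat,
          ((a :: b :: c :: rest).drop (2 * Nat.succ k)).take 2 =
            ((c :: rest).drop (2 * k)).take 2 := by
        intro k
        have h : 2 * Nat.succ k = (2 * k) + 1 + 1 := by omega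
        rw [h, List.drop_succ_cons, List.drop_succ_cons]
      have hmap : (List.range (((c :: rest).length + 1) / 2)).map
            ((fun k => PySem.Str.join " " (((a :: b :: c :: rest).drop (2 * k)).take 2)) ∘ Nat.succ) =
          (List.range (((c :: rest).length + 1) / 2)).map
            (fun k => PySem.Str.join " " (((c :: rest).drop (2 * k)).take 2)) := by
        apply List.map_congr_left
        intro k _
        simp only [Function.comp]
        rw [hdrop k]
      rw [hmap]
      rw [PySem.Str.toList_join, List.map_cons]
      rw [pvJoin_cons_of_ne _ _ _
        (by simp only [ne_eq, List.map_eq_nil_iff, List.range_eq_nil]; exact hne)]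
      simp [pvFmtRec, PySem.Str.toList_join, PySem.Chars.join_cons_cons,
        PySem.Chars.join_singleton, List.take_succ_cons] at ih ⊢
      rw [ih]

-- ===== VERDICT (by name: the statement is the Claim_ definition above) =====
theorem format_args_with_alternate_newlines_spec : Claim_equal_format_args_with_alternate_newlines := by
  intro args _
  unfold Spec_format_args_with_alternate_newlines format_args_with_alternate_newlines
    format_args_with_alternate_newlines_alt
  apply String.toList_inj.mp
  rw [pvFoldl_eq_flatMap (L := (args.length : Int))]
  rw [PySem.Str.toList_join]
  have he : ("" : String).toList = ([] : List Char) := rfl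
  rw [he]
  have h1 := pvKey (args.length : Int) args 0 (by omega) (by omega)
  have h2 := pvChunkKey args
  rw [pvChunkForm args]
  simp only [List.nil_append]
  rw [h1, ← h2]
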